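-- pv_equiv track=rewrite | github.com/costas-basdekis/advent-of-code-submissions | year_2020/day_10/part_a.py | get_sequence_1_and_3_difference_count
-- ===== SOURCE A (Python) =====
-- import itertools
--
-- def get_sequence_1_and_3_difference_count(sequence):
--     """
--     >>> AdapterSet([]).get_sequence_1_and_3_difference_count(
--     ...     [0, 1, 4, 5, 6, 7, 10, 11, 12, 15, 16, 19, 22])
--     (7, 5)
--     """
--     difference_counts = {
--         difference: sum(1 for _ in values)
--         for difference, values in itertools.groupby(sorted(
--             current - previous
--             for previous, current in zip(sequence, sequence[1:])
--         ))
--     }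
--
--     return difference_counts.get(1, 0), difference_counts.get(3, 0)
-- ===== SOURCE B (Python) =====
-- def get_sequence_1_and_3_difference_count(sequence):
--     ones = 0
--     threes = 0
--     for previous, current in zip(sequence, sequence[1:]):
--         difference = current - previous
--         if difference == 1:
--             ones += 1
--         elif difference == 3:
--             threes += 1
--     return ones, threes
-- ===== Notes on version B (the rewrite author's own statement) =====
-- stated objective: faster
-- what changed: B counts differences equal to 1 and 3 in a single pass over adjacent pairs with two counters, instead of sorting all differences, grouping runs with itertools.groupby and building a count dictionary.
import Mathlib
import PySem

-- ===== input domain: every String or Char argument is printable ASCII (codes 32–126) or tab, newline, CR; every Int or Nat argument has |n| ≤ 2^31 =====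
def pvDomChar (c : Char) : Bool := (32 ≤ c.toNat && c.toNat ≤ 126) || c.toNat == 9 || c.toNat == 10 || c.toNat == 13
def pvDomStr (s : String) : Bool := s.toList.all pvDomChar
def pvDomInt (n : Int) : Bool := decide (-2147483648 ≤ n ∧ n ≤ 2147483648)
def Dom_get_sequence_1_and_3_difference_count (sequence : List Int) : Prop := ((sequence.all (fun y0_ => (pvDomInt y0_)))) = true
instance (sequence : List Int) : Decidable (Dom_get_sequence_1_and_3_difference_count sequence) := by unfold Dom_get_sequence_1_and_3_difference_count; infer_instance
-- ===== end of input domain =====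

-- B replaces A's sort + itertools.groupby + count dictionary by one pass over the
-- adjacent pairs with two counters (O(n) instead of O(n log n)).

-- ===== PORT A =====
-- itertools.groupby of a list, each group paired with its length (sum(1 for _ in values));
-- exact for grouping adjacent equal elements (here applied to a sorted list).
def pvGroupRuns : List Int → List (Int × Int)
  | [] => []
  | x :: xs =>
    match pvGroupRuns xs with
    | [] => [(x, 1)]
    | (y, n) :: rest => if x = y then (y, n + 1) :: rest else (x, 1) :: (y, n) :: rest

-- dict.get(k, 0) on the comprehension's dict; since groupby over a sorted list yields
-- distinct keys, the dict is exactly the association list of runs and get = first match.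
def pvLookupD (k : Int) : List (Int × Int) → Int
  | [] => 0
  | (y, n) :: rest => if k = y then n else pvLookupD k rest

def get_sequence_1_and_3_difference_count (sequence : List Int) : List Int :=
  -- current - previous for previous, current in zip(sequence, sequence[1:])
  let diffs := (sequence.zip (PySem.List.slice sequence (some 1) none)).map (fun p => p.2 - p.1)
  -- {difference: count for difference, values in groupby(sorted(diffs))}
  let difference_counts := pvGroupRuns (PySem.List.sorted diffs (fun x => x) false)
  [pvLookupD 1 difference_counts, pvLookupD 3 difference_counts]

-- ===== PORT B =====
def get_sequence_1_and_3_difference_count_alt (sequence : List Int) : List Int :=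
  let r := (sequence.zip (PySem.List.slice sequence (some 1) none)).foldl
    (fun (acc : Int × Int) p =>
      let difference := p.2 - p.1
      if difference = 1 then (acc.1 + 1, acc.2)
      else if difference = 3 then (acc.1, acc.2 + 1)
      else acc) (0, 0)
  [r.1, r.2]

-- ===== PRECONDITION & SPEC =====
def Spec_get_sequence_1_and_3_difference_count (sequence : List Int) (out : List Int) : Prop := out = get_sequence_1_and_3_difference_count_alt sequence
instance (sequence : List Int) (out : List Int) : Decidable (Spec_get_sequence_1_and_3_difference_count sequence out) := by unfold Spec_get_sequence_1_and_3_difference_count; infer_instance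

-- ===== CLAIM (what is proved, stated in full; the proofs are below) =====
def Claim_equal_get_sequence_1_and_3_difference_count : Prop := ∀ (sequence : List Int), Dom_get_sequence_1_and_3_difference_count sequence → Spec_get_sequence_1_and_3_difference_count sequence (get_sequence_1_and_3_difference_count sequence)

-- ===== LEMMAS AND PROOFS =====

-- the head of pvGroupRuns (x :: xs) carries key x
theorem pvGroupRuns_cons_head (x : Int) (xs : List Int) :
    ∃ n rest, pvGroupRuns (x :: xs) = (x, n) :: rest := by
  unfold pvGroupRuns
  cases h : pvGroupRuns xs with
  | nil => exact ⟨1, [], rfl⟩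
  | cons p rest =>
    obtain ⟨y, n⟩ := p
    by_cases hxy : x = y
    · subst hxy; simp
    · simp [hxy]

-- first-match lookup in the runs of a sorted list is the count
theorem pvLookupD_groupRuns_sorted :
    ∀ (l : List Int), l.Pairwise (· ≤ ·) → ∀ k, pvLookupD k (pvGroupRuns l) = (l.count k : Int) := by
  intro l
  induction l with
  | nil => intro _ k; simp [pvGroupRuns, pvLookupD]
  | cons x xs ih =>
    intro hp k
    have hptail := (List.pairwise_cons.mp hp).2
    have hle : ∀ y ∈ xs, x ≤ y := (List.pairwise_cons.mp hp).1
    have IH := ih hptail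
    cases hxs : xs with
    | nil =>
      subst hxs
      simp only [pvGroupRuns, pvLookupD, List.count_cons, List.count_nil]
      by_cases hk : k = x <;> simp [hk, Ne.symm]
    | cons z t =>
      subst hxs
      obtain ⟨m, r, hruns⟩ := pvGroupRuns_cons_head z t
      have hunf : pvGroupRuns (x :: z :: t)
          = if x = z then (z, m + 1) :: r else (x, 1) :: (z, m) :: r := by
        show (match pvGroupRuns (z :: t) with
          | [] => [(x, 1)]
          | (y, n) :: rest => if x = y then (y, n + 1) :: rest
                              else (x, 1) :: (y, n) :: rest) = _
        rw [hruns]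
      by_cases hxz : x = z
      · -- x continues the first run of z :: t
        rw [hunf, if_pos hxz]
        by_cases hk : k = z
        · have hm : m = ((z :: t).count z : Int) := by
            have := IH z; rw [hruns] at this; simpa [pvLookupD] using this
          subst hk
          simp [pvLookupD, ← hxz, hm]
        · have hrest : pvLookupD k r = ((z :: t).count k : Int) := by
            have := IH k; rw [hruns] at this; simpa [pvLookupD, hk] using this
          have hkx : k ≠ x := by rw [hxz]; exact hk
          simp [pvLookupD, hk, hrest, List.count_cons, Ne.symm hkx]
      · -- x starts a fresh run; x does not occur in z :: t
        have hnotmem : x ∉ z :: t := by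
          intro hmem
          have h1 : x ≤ z := hle z (List.mem_cons_self ..)
          rcases List.mem_cons.mp hmem with h | h
          · exact hxz h
          · have h2 : z ≤ x := (List.pairwise_cons.mp hptail).1 x h
            exact hxz (le_antisymm h1 h2)
        have hcnt0 : (z :: t).count x = 0 := List.count_eq_zero.mpr hnotmem
        rw [hunf, if_neg hxz]
        by_cases hk : k = x
        · subst hk
          simp [pvLookupD, hcnt0]
        · have hIHk : pvLookupD k ((z, m) :: r) = ((z :: t).count k : Int) := by
            have := IH k; rw [hruns] at this; exact this
          simp only [pvLookupD, if_neg hk] at hIHk ⊢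
          rw [hIHk]
          simp [List.count_cons, Ne.symm hk]

-- the single pass adds the number of 1-differences and 3-differences to the accumulator
theorem pvFold_count :
    ∀ (l : List (Int × Int)) (a b : Int),
      l.foldl (fun (acc : Int × Int) p =>
        let difference := p.2 - p.1
        if difference = 1 then (acc.1 + 1, acc.2)
        else if difference = 3 then (acc.1, acc.2 + 1)
        else acc) (a, b)
      = (a + ((l.map (fun p => p.2 - p.1)).count 1 : Int),
         b + ((l.map (fun p => p.2 - p.1)).count 3 : Int)) := by
  intro l
  induction l with
  | nil => intro a b; simp
  | cons p t ih =>
    intro a b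
    obtain ⟨u, v⟩ := p
    by_cases h1 : v - u = 1
    · simp [h1, ih]; ring
    · by_cases h3 : v - u = 3
      · simp [h3, ih]; ring
      · simp [h1, h3, ih]

-- ===== VERDICT (by name: the statement is the Claim_ definition above) =====
theorem get_sequence_1_and_3_difference_count_spec : Claim_equal_get_sequence_1_and_3_difference_count := by
  intro sequence _
  unfold Spec_get_sequence_1_and_3_difference_count
  unfold get_sequence_1_and_3_difference_count get_sequence_1_and_3_difference_count_alt
  have hperm := PySem.List.sorted_perm
    ((sequence.zip (PySem.List.slice sequence (some 1) none)).map (fun p => p.2 - p.1))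
    (fun x => x) false
  have hsortedp := PySem.List.sorted_pairwise
    ((sequence.zip (PySem.List.slice sequence (some 1) none)).map (fun p => p.2 - p.1))
    (fun x => x)
  have h1 := pvLookupD_groupRuns_sorted _ hsortedp 1
  have h3 := pvLookupD_groupRuns_sorted _ hsortedp 3
  rw [hperm.count_eq] at h1 h3
  simp only [pvFold_count, h1, h3, zero_add]
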